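-- pv_equiv track=rewrite | github.com/roytian1992/NarrativeKnowledgeWeaver | core/builder/event_processor.py | _all_covering_windows
-- ===== SOURCE A (Python) =====
-- from typing import List, Dict, Tuple, Optional, Any, Set, Callable
-- from collections import defaultdict, Counter
--
-- def _all_covering_windows(chain: List[str], universe: Set[str], min_length: int) -> List[List[str]]:
--     """
--     Enumerate all contiguous sub-sequences (windows) within `chain` that cover
--     every element in `universe` at least once, with window length >= min_length.
--
--     Args:
--         chain: Original sequence.
--         universe: Set of required elements to be covered.
--         min_length: Minimum length of windows.
--
--     Returns:
--         List of windows (each a list of node IDs).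
--     """
--     need = {x: 1 for x in universe}
--     have = Counter()
--     covered = 0
--     need_total = len(need)
--     res = []
--     n = len(chain)
--     r = 0
--     for l in range(n):
--         while r < n and covered < need_total:
--             x = chain[r]
--             if x in need:
--                 have[x] += 1
--                 if have[x] == 1:
--                     covered += 1
--             r += 1
--         if covered == need_total:
--             min_r = r - 1
--             start_r = max(min_r, l + min_length - 1)
--             if start_r < n:
--                 for rr in range(start_r, n):
--                     res.append(chain[l:rr + 1])
--         x = chain[l]
--         if x in need:
--             have[x] -= 1
--             if have[x] == 0:
--                 covered -= 1
--     return res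
-- ===== SOURCE B (Python) =====
-- def _all_covering_windows(chain, universe, min_length):
--     """Per-left-index rescan: for each l, find the minimal covering end with a
--     fresh 'remaining' set, then emit all windows from there."""
--     n = len(chain)
--     need = set(universe)
--     res = []
--     for l in range(n):
--         remaining = set(need)
--         min_r = l - 1
--         while remaining and min_r + 1 < n:
--             min_r += 1
--             remaining.discard(chain[min_r])
--         if remaining:
--             continue
--         start_r = max(min_r, l + min_length - 1)
--         for rr in range(start_r, n):
--             res.append(chain[l:rr + 1])
--     return res
-- ===== Notes on version B (the rewrite author's own statement) =====
-- stated objective: simpler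
-- what changed: Replaced A's single amortized two-pointer sweep with shared Counter/covered state by an independent per-left-index forward rescan that shrinks a fresh 'remaining' set until the universe is covered; per left index the minimal covering end and hence the emitted windows are identical.
-- intended difference: When universe is empty, min_length is negative and len(chain) >= 2, A's stale right pointer (min_r = -1 for every l) makes it emit extra duplicate empty windows for l >= 1 (e.g. chain[2:0]); B uses the true minimal covering end l-1 of the empty universe, emitting each window exactly once from its start, which is the intended enumeration. — e.g. on _all_covering_windows(["a", "b"], [], -1): A returns [[], ["a"], ["a", "b"], [], [], ["b"]], B returns [[], ["a"], ["a", "b"], [], ["b"]]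
import Mathlib
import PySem

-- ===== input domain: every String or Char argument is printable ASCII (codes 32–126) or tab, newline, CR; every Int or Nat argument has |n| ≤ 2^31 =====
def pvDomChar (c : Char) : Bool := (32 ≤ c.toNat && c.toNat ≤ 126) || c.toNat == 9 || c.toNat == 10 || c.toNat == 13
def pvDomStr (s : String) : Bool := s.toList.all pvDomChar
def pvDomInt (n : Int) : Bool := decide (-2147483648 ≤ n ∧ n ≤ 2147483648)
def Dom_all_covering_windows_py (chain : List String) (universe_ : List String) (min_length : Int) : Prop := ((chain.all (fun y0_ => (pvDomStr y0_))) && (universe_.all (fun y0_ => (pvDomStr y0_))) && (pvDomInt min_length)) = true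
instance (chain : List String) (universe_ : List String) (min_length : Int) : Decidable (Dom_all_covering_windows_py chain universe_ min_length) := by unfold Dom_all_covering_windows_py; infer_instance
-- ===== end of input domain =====

-- B replaces A's amortized two-pointer sweep (shared Counter state) by an independent
-- per-left-index rescan with a shrinking 'remaining' set (objective: simpler); on the
-- corner 'universe empty ∧ min_length < 0 ∧ |chain| ≥ 2' (D_ below) A's stale right
-- pointer emits extra duplicate empty windows and B intentionally does not.

-- ===== PORT A =====
-- inner 'while r < n and covered < need_total' loop of A
def acwWhile (fuel : Nat) (chain needS : List String) (needTotal : Int) (n : Nat)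
    (r : Nat) (hv : PySem.Dict String Int) (covered : Int) :
    Nat × PySem.Dict String Int × Int :=
  match fuel with
  | 0 => (r, hv, covered)
  | fuel + 1 =>
  if r < n ∧ covered < needTotal then
    let x := chain.getD r ""
    if x ∈ needS then
      let hv' := hv.modify x 0 (· + 1)
      let covered' := if hv'.getD x 0 = 1 then covered + 1 else covered
      acwWhile fuel chain needS needTotal n (r + 1) hv' covered'
    else
      acwWhile fuel chain needS needTotal n (r + 1) hv covered
  else (r, hv, covered)

-- outer 'for l in range(n)' loop of A
def acwLoop (fuel : Nat) (chain needS : List String) (needTotal minLength : Int) (n : Nat)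
    (l : Nat) (r : Nat) (hv : PySem.Dict String Int) (covered : Int)
    (res : List (List String)) : List (List String) :=
  match fuel with
  | 0 => res
  | fuel + 1 =>
  if l < n then
    let t := acwWhile n chain needS needTotal n r hv covered
    let r' := t.1
    let hv' := t.2.1
    let covered' := t.2.2
    let res' :=
      if covered' = needTotal then
        let min_r : Int := (r' : Int) - 1
        let start_r : Int := max min_r ((l : Int) + minLength - 1)
        if start_r < (n : Int) then
          (PySem.List.pyRange start_r (n : Int) 1).foldl
            (fun acc rr => acc ++ [PySem.List.slice chain (some (l : Int)) (some (rr + 1))]) res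
        else res
      else res
    let x := chain.getD l ""
    if x ∈ needS then
      let hv2 := hv'.modify x 0 (· - 1)
      let covered2 := if hv2.getD x 0 = 0 then covered' - 1 else covered'
      acwLoop fuel chain needS needTotal minLength n (l + 1) r' hv2 covered2 res'
    else
      acwLoop fuel chain needS needTotal minLength n (l + 1) r' hv' covered' res'
  else res

def all_covering_windows_py (chain : List String) (universe_ : List String) (min_length : Int) : List (List String) :=
  let need := PySem.Set.ofList universe_
  let need_total : Int := (need.length : Int)
  acwLoop chain.length chain need need_total min_length chain.length 0 0 PySem.Dict.empty 0 []

-- ===== PORT B =====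
-- inner 'while remaining and min_r + 1 < n' scan of B
def bScan (fuel : Nat) (chain : List String) (n : Int) (remaining : List String) (min_r : Int) :
    List String × Int :=
  match fuel with
  | 0 => (remaining, min_r)
  | fuel + 1 =>
  if remaining ≠ [] ∧ min_r + 1 < n then
    let min_r' := min_r + 1
    let remaining' := PySem.Set.discard remaining ((PySem.List.pyGet? chain min_r').getD "")
    bScan fuel chain n remaining' min_r'
  else (remaining, min_r)

def all_covering_windows_py_alt (chain : List String) (universe_ : List String) (min_length : Int) : List (List String) :=
  (List.range chain.length).foldl
    (fun (res : List (List String)) (l : Nat) =>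
      let t := bScan chain.length chain (chain.length : Int) (PySem.Set.ofList universe_) ((l : Int) - 1)
      if t.1 ≠ [] then res
      else
        (PySem.List.pyRange (max t.2 ((l : Int) + min_length - 1)) (chain.length : Int) 1).foldl
          (fun acc rr => acc ++ [PySem.List.slice chain (some (l : Int)) (some (rr + 1))]) res) []

-- ===== PRECONDITION & SPEC =====
-- On inputs with universe empty, min_length < 0 and len(chain) >= 2, A's stale right
-- pointer (min_r = -1 for every l) emits extra duplicate empty windows for l >= 1,
-- while B emits each window exactly once from the true minimal covering end l-1,
-- which is the intended enumeration.
def D_all_covering_windows_py (chain : List String) (universe_ : List String) (min_length : Int) : Prop :=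
  universe_ = [] ∧ min_length < 0 ∧ 2 ≤ chain.length
instance (chain : List String) (universe_ : List String) (min_length : Int) : Decidable (D_all_covering_windows_py chain universe_ min_length) := by
  unfold D_all_covering_windows_py; infer_instance

def Spec_all_covering_windows_py (chain : List String) (universe_ : List String) (min_length : Int) (out : List (List String)) : Prop :=
  ¬ D_all_covering_windows_py chain universe_ min_length → out = all_covering_windows_py_alt chain universe_ min_length
instance (chain : List String) (universe_ : List String) (min_length : Int) (out : List (List String)) : Decidable (Spec_all_covering_windows_py chain universe_ min_length out) := by
  unfold Spec_all_covering_windows_py; infer_instance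

def pvDiffWitness_all_covering_windows_py : List String × List String × Int := (["a", "b"], [], -1)
def pvDiffWitnessOut_all_covering_windows_py : (List (List String)) × (List (List String)) :=
  ([[], ["a"], ["a", "b"], [], [], ["b"]], [[], ["a"], ["a", "b"], [], ["b"]])

-- ===== CLAIM (what is proved, stated in full; the proofs are below) =====
def Claim_unchanged_all_covering_windows_py : Prop := ∀ (chain : List String) (universe_ : List String) (min_length : Int), Dom_all_covering_windows_py chain universe_ min_length → Spec_all_covering_windows_py chain universe_ min_length (all_covering_windows_py chain universe_ min_length)
def Claim_changed_all_covering_windows_py : Prop := Dom_all_covering_windows_py (pvDiffWitness_all_covering_windows_py.1) (pvDiffWitness_all_covering_windows_py.2.1) (pvDiffWitness_all_covering_windows_py.2.2) ∧ D_all_covering_windows_py (pvDiffWitness_all_covering_windows_py.1) (pvDiffWitness_all_covering_windows_py.2.1) (pvDiffWitness_all_covering_windows_py.2.2) ∧ all_covering_windows_py (pvDiffWitness_all_covering_windows_py.1) (pvDiffWitness_all_covering_windows_py.2.1) (pvDiffWitness_all_covering_windows_py.2.2) = pvDiffWitnessOut_all_covering_windows_py.1 ∧ all_covering_windows_py_alt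 (pvDiffWitness_all_covering_windows_py.1) (pvDiffWitness_all_covering_windows_py.2.1) (pvDiffWitness_all_covering_windows_py.2.2) = pvDiffWitnessOut_all_covering_windows_py.2 ∧ pvDiffWitnessOut_all_covering_windows_py.1 ≠ pvDiffWitnessOut_all_covering_windows_py.2
def Claim_exact_all_covering_windows_py : Prop := ∀ (chain : List String) (universe_ : List String) (min_length : Int), Dom_all_covering_windows_py chain universe_ min_length → D_all_covering_windows_py chain universe_ min_length → all_covering_windows_py chain universe_ min_length ≠ all_covering_windows_py_alt chain universe_ min_length

-- ===== LEMMAS AND PROOFS =====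

-- window chain[l:r] (half-open) as a list
def pvWin (chain : List String) (l r : Nat) : List String := (chain.drop l).take (r - l)
-- does chain[l:r] cover needS?
def pvCovB (chain needS : List String) (l r : Nat) : Bool :=
  needS.all (fun x => decide (x ∈ pvWin chain l r))
-- number of elements of needS present in chain[l:r]
def pvCvd (chain needS : List String) (l r : Nat) : Nat :=
  needS.countP (fun x => decide (x ∈ pvWin chain l r))
-- minimal r in [l, n] such that chain[l:r] covers needS
def pvMc (chain needS : List String) (l : Nat) : Option Nat :=
  (List.range (chain.length + 1)).find? (fun r => decide (l ≤ r) && pvCovB chain needS l r)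
-- the windows emitted for left index l, given the value m used as min_r
def pvWinsFrom (chain : List String) (minLength : Int) (l : Nat) (m : Int) : List (List String) :=
  (PySem.List.pyRange (max m ((l : Int) + minLength - 1)) ((chain.length : Nat) : Int) 1).map
    (fun rr => PySem.List.slice chain (some (l : Int)) (some (rr + 1)))
-- reference per-l contribution (B's semantics: min_r = (mc l) - 1)
def pvWRef (chain needS : List String) (minLength : Int) (l : Nat) : List (List String) :=
  match pvMc chain needS l with
  | some m => pvWinsFrom chain minLength l ((m : Int) - 1)
  | none => []

lemma pvWin_self (chain : List String) (l : Nat) : pvWin chain l l = [] := by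
  simp [pvWin]

lemma pvWin_snoc (chain : List String) (l r : Nat) (hl : l ≤ r) (hr : r < chain.length) :
    pvWin chain l (r + 1) = pvWin chain l r ++ [chain.getD r ""] := by
  unfold pvWin
  rw [show r + 1 - l = (r - l) + 1 by omega, List.take_add_one]
  have h2 : (chain.drop l)[r - l]? = some (chain.getD r "") := by
    rw [List.getElem?_drop, show l + (r - l) = r by omega,
      List.getD_eq_getElem chain "" hr, List.getElem?_eq_getElem hr]
  rw [h2]
  rfl

lemma pvWin_cons (chain : List String) (l r : Nat) (hlr : l < r) (hl : l < chain.length) :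
    pvWin chain l r = chain.getD l "" :: pvWin chain (l + 1) r := by
  unfold pvWin
  rw [List.drop_eq_getElem_cons hl, show r - l = (r - (l + 1)) + 1 by omega,
    List.take_succ_cons, List.getD_eq_getElem chain "" hl]

lemma pvWin_drop_one (chain : List String) (l r : Nat) :
    pvWin chain (l + 1) r = (pvWin chain l r).drop 1 := by
  unfold pvWin
  rw [show chain.drop (l + 1) = (chain.drop l).drop 1 by rw [List.drop_drop],
    List.drop_take, show r - l - 1 = r - (l + 1) by omega]

lemma pvWin_mem_shrink (chain : List String) (l r : Nat) (x : String)
    (hx : x ∈ pvWin chain (l + 1) r) : x ∈ pvWin chain l r := by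
  rw [pvWin_drop_one] at hx
  exact List.drop_subset _ _ hx

lemma pv_countP_mem_cons (S w : List String) (c : String) (hS : S.Nodup) :
    S.countP (fun y => decide (y ∈ c :: w)) =
      S.countP (fun y => decide (y ∈ w)) + (if c ∈ S ∧ c ∉ w then 1 else 0) := by
  induction S with
  | nil => simp
  | cons a S ih =>
    rw [List.countP_cons, List.countP_cons]
    have hna : a ∉ S := (List.nodup_cons.mp hS).1
    have hnd : S.Nodup := (List.nodup_cons.mp hS).2
    by_cases hac : a = c
    · subst hac
      have hc : S.countP (fun y => decide (y ∈ a :: w)) = S.countP (fun y => decide (y ∈ w)) := by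
        apply List.countP_congr
        intro y hy
        have hyne : y ≠ a := fun h => hna (h ▸ hy)
        simp [List.mem_cons, hyne]
      rw [hc]
      by_cases hw : a ∈ w <;> simp [hw, hna]
    · have h1 : (decide (a ∈ c :: w)) = (decide (a ∈ w)) := by
        simp [List.mem_cons, hac]
      rw [h1, ih hnd]
      have h2 : (c ∈ a :: S ∧ c ∉ w) ↔ (c ∈ S ∧ c ∉ w) := by
        simp only [List.mem_cons]
        constructor
        · rintro ⟨hca | hcs, hcw⟩
          · exact absurd hca.symm hac
          · exact ⟨hcs, hcw⟩
        · rintro ⟨hcs, hcw⟩; exact ⟨Or.inr hcs, hcw⟩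
      rw [if_congr h2 rfl rfl]
      split_ifs <;> omega

lemma pv_countP_mem_snoc (S w : List String) (c : String) (hS : S.Nodup) :
    S.countP (fun y => decide (y ∈ w ++ [c])) =
      S.countP (fun y => decide (y ∈ w)) + (if c ∈ S ∧ c ∉ w then 1 else 0) := by
  have h : S.countP (fun y => decide (y ∈ w ++ [c])) = S.countP (fun y => decide (y ∈ c :: w)) := by
    apply List.countP_congr
    intro y hy
    simp [List.mem_append, List.mem_cons, or_comm]
  rw [h, pv_countP_mem_cons S w c hS]

lemma pvCvd_le (chain S : List String) (l r : Nat) : pvCvd chain S l r ≤ S.length :=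
  List.countP_le_length

lemma pvCvd_snoc (chain S : List String) (l r : Nat) (hS : S.Nodup) (hl : l ≤ r)
    (hr : r < chain.length) :
    pvCvd chain S l (r + 1) =
      pvCvd chain S l r + (if chain.getD r "" ∈ S ∧ chain.getD r "" ∉ pvWin chain l r then 1 else 0) := by
  unfold pvCvd
  simp only [pvWin_snoc chain l r hl hr]
  exact pv_countP_mem_snoc S (pvWin chain l r) (chain.getD r "") hS

lemma pvCvd_cons (chain S : List String) (l r : Nat) (hS : S.Nodup) (hlr : l < r)
    (hl : l < chain.length) :
    pvCvd chain S l r =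
      pvCvd chain S (l + 1) r +
        (if chain.getD l "" ∈ S ∧ chain.getD l "" ∉ pvWin chain (l + 1) r then 1 else 0) := by
  unfold pvCvd
  conv_lhs => rw [pvWin_cons chain l r hlr hl]
  exact pv_countP_mem_cons S (pvWin chain (l + 1) r) (chain.getD l "") hS

lemma pvCvd_shrink (chain S : List String) (l j : Nat) :
    pvCvd chain S (l + 1) j ≤ pvCvd chain S l j := by
  apply List.countP_mono_left
  intro x _ h
  simp only [decide_eq_true_eq] at h ⊢
  exact pvWin_mem_shrink chain l j x h

lemma pvCovB_iff (chain S : List String) (l r : Nat) :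
    pvCovB chain S l r = true ↔ pvCvd chain S l r = S.length := by
  unfold pvCovB pvCvd
  rw [List.all_eq_true, List.countP_eq_length]

lemma pvCovB_false (chain S : List String) (l r : Nat) (h : pvCvd chain S l r < S.length) :
    pvCovB chain S l r = false := by
  rw [← Bool.not_eq_true, pvCovB_iff]
  omega

lemma pv_find_range_first (N k : Nat) (p : Nat → Bool) (hk : k < N) (hpk : p k = true)
    (hmin : ∀ j, j < k → p j = false) : (List.range N).find? p = some k := by
  have hsplit : List.range N = List.range k ++ List.range' k (N - k) := by
    rw [List.range_eq_range', List.range_eq_range', show N = k + (N - k) by omega,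
      ← List.range'_append]
    simp
  rw [hsplit, List.find?_append]
  have h1 : (List.range k).find? p = none :=
    List.find?_eq_none.mpr (by intro x hx; rw [hmin x (List.mem_range.mp hx)]; simp)
  rw [h1, show N - k = (N - k - 1) + 1 by omega, List.range'_succ]
  simp [hpk]

lemma pvMc_eq_some (chain S : List String) (l k : Nat) (hlk : l ≤ k) (hkn : k ≤ chain.length)
    (hcov : pvCovB chain S l k = true) (hmin : ∀ j, l ≤ j → j < k → pvCovB chain S l j = false) :
    pvMc chain S l = some k := by
  unfold pvMc
  apply pv_find_range_first _ k _ (by omega) (by simp [hlk, hcov])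
  intro j hj
  by_cases hlj : l ≤ j
  · simp [hlj, hmin j hlj hj]
  · simp [hlj]

lemma pvMc_eq_none (chain S : List String) (l : Nat)
    (h : ∀ j, l ≤ j → j ≤ chain.length → pvCovB chain S l j = false) :
    pvMc chain S l = none := by
  unfold pvMc
  rw [List.find?_eq_none]
  intro j hj
  have hjle : j ≤ chain.length := by have := List.mem_range.mp hj; omega
  by_cases hlj : l ≤ j
  · simp [hlj, h j hlj hjle]
  · simp [hlj]

lemma acwWhile_spec (chain S : List String) (l : Nat) (hS : S.Nodup) :
    ∀ (fuel r : Nat) (hv : PySem.Dict String Int) (covered : Int),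
      chain.length - r ≤ fuel → l ≤ r → r ≤ chain.length →
      (∀ x, hv.getD x 0 = if x ∈ S then ((pvWin chain l r).count x : Int) else 0) →
      covered = (pvCvd chain S l r : Int) →
      ∃ (r₂ : Nat) (hv₂ : PySem.Dict String Int),
        acwWhile fuel chain S (S.length : Int) chain.length r hv covered
          = (r₂, hv₂, (pvCvd chain S l r₂ : Int)) ∧
        r ≤ r₂ ∧ r₂ ≤ chain.length ∧
        (∀ x, hv₂.getD x 0 = if x ∈ S then ((pvWin chain l r₂).count x : Int) else 0) ∧
        (pvCvd chain S l r₂ = S.length ∨ r₂ = chain.length) ∧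
        (∀ j, r ≤ j → j < r₂ → pvCvd chain S l j < S.length) := by
  intro fuel
  induction fuel with
  | zero =>
    intro r hv covered hfuel hlr hrn hHV hcov
    exact ⟨r, hv, by simp [acwWhile, hcov], le_refl r, hrn, hHV, Or.inr (by omega), by omega⟩
  | succ fuel ih =>
    intro r hv covered hfuel hlr hrn hHV hcov
    by_cases hcond : r < chain.length ∧ covered < (S.length : Int)
    · have hrlt : r < chain.length := hcond.1
      have hcvdlt : pvCvd chain S l r < S.length := by
        have h := hcond.2
        rw [hcov] at h
        exact_mod_cast h
      have hcount : ∀ y, (pvWin chain l (r + 1)).count y =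
          (pvWin chain l r).count y + (if chain.getD r "" = y then 1 else 0) := by
        intro y
        rw [pvWin_snoc chain l r hlr hrlt]
        simp [List.count_append, List.count_cons]
      by_cases hx : chain.getD r "" ∈ S
      · have hstep : acwWhile (fuel + 1) chain S (S.length : Int) chain.length r hv covered
            = acwWhile fuel chain S (S.length : Int) chain.length (r + 1)
                (hv.modify (chain.getD r "") 0 (· + 1))
                (if (hv.modify (chain.getD r "") 0 (· + 1)).getD (chain.getD r "") 0 = 1
                  then covered + 1 else covered) := by
          conv_lhs => rw [acwWhile]
          rw [if_pos hcond, if_pos hx]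
        have hHV' : ∀ y, (hv.modify (chain.getD r "") 0 (· + 1)).getD y 0 =
            if y ∈ S then ((pvWin chain l (r + 1)).count y : Int) else 0 := by
          intro y
          rw [PySem.Dict.getD_modify]
          by_cases hyx : y = chain.getD r ""
          · rw [if_pos hyx, hyx, hHV (chain.getD r ""), if_pos hx, if_pos hx,
              hcount (chain.getD r ""), if_pos rfl]
            push_cast
            ring
          · rw [if_neg hyx, hHV y]
            by_cases hyS : y ∈ S
            · rw [if_pos hyS, if_pos hyS, hcount y, if_neg (fun h => hyx h.symm)]
              simp
            · rw [if_neg hyS, if_neg hyS]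
        have hget1 : ((hv.modify (chain.getD r "") 0 (· + 1)).getD (chain.getD r "") 0 = 1)
            ↔ chain.getD r "" ∉ pvWin chain l r := by
          rw [PySem.Dict.getD_modify, if_pos rfl, hHV _, if_pos hx]
          constructor
          · intro h
            have hc0 : ((pvWin chain l r).count (chain.getD r "") : Int) = 0 := by omega
            exact List.count_eq_zero.mp (by exact_mod_cast hc0)
          · intro h
            rw [List.count_eq_zero.mpr h]
            norm_num
        have hcvd' := pvCvd_snoc chain S l r hS hlr hrlt
        have hcov' : (if (hv.modify (chain.getD r "") 0 (· + 1)).getD (chain.getD r "") 0 = 1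
              then covered + 1 else covered) = (pvCvd chain S l (r + 1) : Int) := by
          by_cases hmem : chain.getD r "" ∈ pvWin chain l r
          · rw [if_neg (by rw [hget1]; exact fun h => h hmem), hcov, hcvd',
              if_neg (fun h => h.2 hmem)]
            simp
          · rw [if_pos (hget1.mpr hmem), hcov, hcvd', if_pos ⟨hx, hmem⟩]
            push_cast
            ring
        obtain ⟨r₂, hv₂, heq, hle, hr₂n, hHV₂, hterm, hmin⟩ :=
          ih (r + 1) _ _ (by omega) (by omega) (by omega) hHV' hcov'
        refine ⟨r₂, hv₂, by rw [hstep, heq], by omega, hr₂n, hHV₂, hterm, ?_⟩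
        intro j hj hj2
        rcases Nat.eq_or_lt_of_le hj with heqj | hltj
        · rw [← heqj]; exact hcvdlt
        · exact hmin j (by omega) hj2
      · have hstep : acwWhile (fuel + 1) chain S (S.length : Int) chain.length r hv covered
            = acwWhile fuel chain S (S.length : Int) chain.length (r + 1) hv covered := by
          conv_lhs => rw [acwWhile]
          rw [if_pos hcond, if_neg hx]
        have hHV' : ∀ y, hv.getD y 0 =
            if y ∈ S then ((pvWin chain l (r + 1)).count y : Int) else 0 := by
          intro y
          rw [hHV y]
          by_cases hyS : y ∈ S
          · have hne2 : ¬ (chain.getD r "" = y) := fun h => hx (h ▸ hyS)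
            rw [if_pos hyS, if_pos hyS, hcount y, if_neg hne2]
            simp
          · rw [if_neg hyS, if_neg hyS]
        have hcvd' : pvCvd chain S l (r + 1) = pvCvd chain S l r := by
          rw [pvCvd_snoc chain S l r hS hlr hrlt, if_neg (fun h => hx h.1)]
          omega
        have hcov' : covered = (pvCvd chain S l (r + 1) : Int) := by rw [hcvd', hcov]
        obtain ⟨r₂, hv₂, heq, hle, hr₂n, hHV₂, hterm, hmin⟩ :=
          ih (r + 1) _ _ (by omega) (by omega) (by omega) hHV' hcov'
        refine ⟨r₂, hv₂, by rw [hstep, heq], by omega, hr₂n, hHV₂, hterm, ?_⟩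
        intro j hj hj2
        rcases Nat.eq_or_lt_of_le hj with heqj | hltj
        · rw [← heqj]; exact hcvdlt
        · exact hmin j (by omega) hj2
    · have hexit : acwWhile (fuel + 1) chain S (S.length : Int) chain.length r hv covered
          = (r, hv, covered) := by
        conv_lhs => rw [acwWhile]
        rw [if_neg hcond]
      refine ⟨r, hv, by rw [hexit, hcov], le_refl r, hrn, hHV, ?_, by omega⟩
      rcases not_and_or.mp hcond with h | h
      · exact Or.inr (by omega)
      · left
        have h1 : (S.length : Int) ≤ covered := not_lt.mp h
        rw [hcov] at h1
        have h2 : S.length ≤ pvCvd chain S l r := by exact_mod_cast h1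
        have h3 := pvCvd_le chain S l r
        omega

lemma pvEmit_eq (chain : List String) (ml : Int) (l : Nat) (m : Int)
    (res : List (List String)) :
    (if max m ((l : Int) + ml - 1) < (chain.length : Int) then
        (PySem.List.pyRange (max m ((l : Int) + ml - 1)) (chain.length : Int) 1).foldl
          (fun acc rr => acc ++ [PySem.List.slice chain (some (l : Int)) (some (rr + 1))]) res
      else res)
      = res ++ pvWinsFrom chain ml l m := by
  unfold pvWinsFrom
  by_cases hs : max m ((l : Int) + ml - 1) < (chain.length : Int)
  · rw [if_pos hs, PySem.List.foldl_append_singleton_eq_map]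
  · rw [if_neg hs, PySem.List.pyRange_one_eq_nil (by omega)]
    simp

lemma pvDrop_range_cons (N l : Nat) (hl : l < N) :
    (List.range N).drop l = l :: (List.range N).drop (l + 1) := by
  rw [List.drop_eq_getElem_cons (by simpa [List.length_range] using hl)]
  simp

lemma acwLoop_spec (chain S : List String) (ml : Int) (hne : S ≠ []) (hS : S.Nodup) :
    ∀ (fuel l r : Nat) (hv : PySem.Dict String Int) (covered : Int) (res : List (List String)),
      chain.length - l ≤ fuel → l ≤ r → r ≤ chain.length →
      (∀ x, hv.getD x 0 = if x ∈ S then ((pvWin chain l r).count x : Int) else 0) →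
      covered = (pvCvd chain S l r : Int) →
      (∀ j, l ≤ j → j < r → pvCvd chain S l j < S.length) →
      acwLoop fuel chain S (S.length : Int) ml chain.length l r hv covered res
        = res ++ ((List.range chain.length).drop l).flatMap (pvWRef chain S ml) := by
  intro fuel
  induction fuel with
  | zero =>
    intro l r hv covered res hfuel _ _ _ _ _
    have h1 : chain.length ≤ l := by omega
    rw [List.drop_eq_nil_of_le (by simpa [List.length_range] using h1)]
    simp [acwLoop]
  | succ fuel ih =>
    intro l r hv covered res hfuel hlr hrn hHV hcov hQ
    by_cases hl : l < chain.length
    · obtain ⟨r₂, hv₂, hwhile, hrr₂, hr₂n, hHV₂, hterm, hmin⟩ :=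
        acwWhile_spec chain S l hS chain.length r hv covered (by omega) hlr hrn hHV hcov
      have hQ₂ : ∀ j, l ≤ j → j < r₂ → pvCvd chain S l j < S.length := by
        intro j h1 h2
        by_cases h3 : j < r
        · exact hQ j h1 h3
        · exact hmin j (by omega) h2
      have hQshrink : ∀ j, l + 1 ≤ j → j < r₂ → pvCvd chain S (l + 1) j < S.length := by
        intro j h1 h2
        have := pvCvd_shrink chain S l j
        have := hQ₂ j (by omega) h2
        omega
      have hdrop := pvDrop_range_cons chain.length l hl
      conv_lhs => rw [acwLoop]
      rw [if_pos hl, hwhile]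
      simp only []
      by_cases hc : (pvCvd chain S l r₂ : Int) = (S.length : Int)
      · have hcN : pvCvd chain S l r₂ = S.length := by exact_mod_cast hc
        have hlr₂ : l < r₂ := by
          obtain ⟨y, hy⟩ := List.exists_mem_of_ne_nil S hne
          have hcv := (pvCovB_iff chain S l r₂).mpr hcN
          rw [pvCovB, List.all_eq_true] at hcv
          have hyin : y ∈ pvWin chain l r₂ := by simpa using hcv y hy
          by_contra hcon
          have hwe : pvWin chain l r₂ = [] := by
            unfold pvWin
            rw [show r₂ - l = 0 by omega]
            simp
          rw [hwe] at hyin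
          simp at hyin
        have hmc : pvMc chain S l = some r₂ :=
          pvMc_eq_some chain S l r₂ (by omega) hr₂n ((pvCovB_iff chain S l r₂).mpr hcN)
            (fun j h1 h2 => pvCovB_false chain S l j (hQ₂ j h1 h2))
        have hwref : pvWRef chain S ml l = pvWinsFrom chain ml l ((r₂ : Int) - 1) := by
          unfold pvWRef
          rw [hmc]
        rw [if_pos hc, pvEmit_eq chain ml l ((r₂ : Int) - 1) res]
        have hwincons := pvWin_cons chain l r₂ hlr₂ hl
        have hcvdcons := pvCvd_cons chain S l r₂ hS hlr₂ hl
        by_cases hx : chain.getD l "" ∈ S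
        · rw [if_pos hx]
          have hHV2 : ∀ y, ((hv₂.modify (chain.getD l "") 0 (· - 1)).getD y 0) =
              if y ∈ S then ((pvWin chain (l + 1) r₂).count y : Int) else 0 := by
            intro y
            rw [PySem.Dict.getD_modify]
            by_cases hyx : y = chain.getD l ""
            · rw [if_pos hyx, hyx, hHV₂ (chain.getD l ""), if_pos hx, if_pos hx]
              have hcnt : (pvWin chain l r₂).count (chain.getD l "")
                  = (pvWin chain (l + 1) r₂).count (chain.getD l "") + 1 := by
                conv_lhs => rw [hwincons]
                rw [List.count_cons, if_pos (beq_self_eq_true _)]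
              rw [hcnt]
              push_cast
              ring
            · rw [if_neg hyx, hHV₂ y]
              by_cases hyS : y ∈ S
              · rw [if_pos hyS, if_pos hyS]
                have hne2 : ¬ (chain.getD l "" = y) := fun h => hyx h.symm
                have hcnt : (pvWin chain l r₂).count y = (pvWin chain (l + 1) r₂).count y := by
                  conv_lhs => rw [hwincons]
                  rw [List.count_cons, if_neg (fun h => hne2 (eq_of_beq h))]
                  omega
                rw [hcnt]
              · rw [if_neg hyS, if_neg hyS]
          have hget0 : ((hv₂.modify (chain.getD l "") 0 (· - 1)).getD (chain.getD l "") 0 = 0)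
              ↔ chain.getD l "" ∉ pvWin chain (l + 1) r₂ := by
            rw [hHV2 _, if_pos hx]
            constructor
            · intro h
              exact List.count_eq_zero.mp (by exact_mod_cast h)
            · intro h
              rw [List.count_eq_zero.mpr h]
              norm_num
          have hcov2 : (if (hv₂.modify (chain.getD l "") 0 (· - 1)).getD (chain.getD l "") 0 = 0
                then (pvCvd chain S l r₂ : Int) - 1 else (pvCvd chain S l r₂ : Int))
              = (pvCvd chain S (l + 1) r₂ : Int) := by
            by_cases hm : chain.getD l "" ∈ pvWin chain (l + 1) r₂
            · rw [if_neg (by rw [hget0]; exact fun h => h hm), hcvdcons,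
                if_neg (fun h => h.2 hm)]
              simp
            · rw [if_pos (hget0.mpr hm), hcvdcons, if_pos ⟨hx, hm⟩]
              push_cast
              ring
          rw [ih (l + 1) r₂ _ _ _ (by omega) (by omega) hr₂n hHV2 hcov2 hQshrink]
          rw [hdrop, List.flatMap_cons, hwref]
          simp [List.append_assoc]
        · rw [if_neg hx]
          have hHV2 : ∀ y, hv₂.getD y 0 =
              if y ∈ S then ((pvWin chain (l + 1) r₂).count y : Int) else 0 := by
            intro y
            rw [hHV₂ y]
            by_cases hyS : y ∈ S
            · rw [if_pos hyS, if_pos hyS]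
              have hne2 : ¬ (chain.getD l "" = y) := fun h => hx (h ▸ hyS)
              have hcnt : (pvWin chain l r₂).count y = (pvWin chain (l + 1) r₂).count y := by
                conv_lhs => rw [hwincons]
                rw [List.count_cons, if_neg (fun h => hne2 (eq_of_beq h))]
                omega
              rw [hcnt]
            · rw [if_neg hyS, if_neg hyS]
          have hcov2 : (pvCvd chain S l r₂ : Int) = (pvCvd chain S (l + 1) r₂ : Int) := by
            rw [hcvdcons, if_neg (fun h => hx h.1)]
            simp
          rw [ih (l + 1) r₂ _ _ _ (by omega) (by omega) hr₂n hHV2 hcov2 hQshrink]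
          rw [hdrop, List.flatMap_cons, hwref]
          simp [List.append_assoc]
      · have hr₂len : r₂ = chain.length := by
          rcases hterm with ht | ht
          · exact absurd (by exact_mod_cast ht) hc
          · exact ht
        have hlr₂ : l < r₂ := by omega
        have hcN : pvCvd chain S l r₂ < S.length := by
          have h1 := pvCvd_le chain S l r₂
          have h2 : pvCvd chain S l r₂ ≠ S.length := fun h => hc (by exact_mod_cast h)
          omega
        have hmc : pvMc chain S l = none := by
          apply pvMc_eq_none
          intro j hj1 hj2
          rcases Nat.lt_or_ge j chain.length with hjlt | hjge
          · exact pvCovB_false chain S l j (hQ₂ j hj1 (by omega))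
          · have hje : j = r₂ := by omega
            rw [hje]
            exact pvCovB_false chain S l r₂ hcN
        have hwref : pvWRef chain S ml l = [] := by
          unfold pvWRef
          rw [hmc]
        rw [if_neg hc]
        have hwincons := pvWin_cons chain l r₂ hlr₂ hl
        have hcvdcons := pvCvd_cons chain S l r₂ hS hlr₂ hl
        by_cases hx : chain.getD l "" ∈ S
        · rw [if_pos hx]
          have hHV2 : ∀ y, ((hv₂.modify (chain.getD l "") 0 (· - 1)).getD y 0) =
              if y ∈ S then ((pvWin chain (l + 1) r₂).count y : Int) else 0 := by
            intro y
            rw [PySem.Dict.getD_modify]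
            by_cases hyx : y = chain.getD l ""
            · rw [if_pos hyx, hyx, hHV₂ (chain.getD l ""), if_pos hx, if_pos hx]
              have hcnt : (pvWin chain l r₂).count (chain.getD l "")
                  = (pvWin chain (l + 1) r₂).count (chain.getD l "") + 1 := by
                conv_lhs => rw [hwincons]
                rw [List.count_cons, if_pos (beq_self_eq_true _)]
              rw [hcnt]
              push_cast
              ring
            · rw [if_neg hyx, hHV₂ y]
              by_cases hyS : y ∈ S
              · rw [if_pos hyS, if_pos hyS]
                have hne2 : ¬ (chain.getD l "" = y) := fun h => hyx h.symm
                have hcnt : (pvWin chain l r₂).count y = (pvWin chain (l + 1) r₂).count y := by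
                  conv_lhs => rw [hwincons]
                  rw [List.count_cons, if_neg (fun h => hne2 (eq_of_beq h))]
                  omega
                rw [hcnt]
              · rw [if_neg hyS, if_neg hyS]
          have hget0 : ((hv₂.modify (chain.getD l "") 0 (· - 1)).getD (chain.getD l "") 0 = 0)
              ↔ chain.getD l "" ∉ pvWin chain (l + 1) r₂ := by
            rw [hHV2 _, if_pos hx]
            constructor
            · intro h
              exact List.count_eq_zero.mp (by exact_mod_cast h)
            · intro h
              rw [List.count_eq_zero.mpr h]
              norm_num
          have hcov2 : (if (hv₂.modify (chain.getD l "") 0 (· - 1)).getD (chain.getD l "") 0 = 0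
                then (pvCvd chain S l r₂ : Int) - 1 else (pvCvd chain S l r₂ : Int))
              = (pvCvd chain S (l + 1) r₂ : Int) := by
            by_cases hm : chain.getD l "" ∈ pvWin chain (l + 1) r₂
            · rw [if_neg (by rw [hget0]; exact fun h => h hm), hcvdcons,
                if_neg (fun h => h.2 hm)]
              simp
            · rw [if_pos (hget0.mpr hm), hcvdcons, if_pos ⟨hx, hm⟩]
              push_cast
              ring
          rw [ih (l + 1) r₂ _ _ _ (by omega) (by omega) hr₂n hHV2 hcov2 hQshrink]
          rw [hdrop, List.flatMap_cons, hwref]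
          simp
        · rw [if_neg hx]
          have hHV2 : ∀ y, hv₂.getD y 0 =
              if y ∈ S then ((pvWin chain (l + 1) r₂).count y : Int) else 0 := by
            intro y
            rw [hHV₂ y]
            by_cases hyS : y ∈ S
            · rw [if_pos hyS, if_pos hyS]
              have hne2 : ¬ (chain.getD l "" = y) := fun h => hx (h ▸ hyS)
              have hcnt : (pvWin chain l r₂).count y = (pvWin chain (l + 1) r₂).count y := by
                conv_lhs => rw [hwincons]
                rw [List.count_cons, if_neg (fun h => hne2 (eq_of_beq h))]
                omega
              rw [hcnt]
            · rw [if_neg hyS, if_neg hyS]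
          have hcov2 : (pvCvd chain S l r₂ : Int) = (pvCvd chain S (l + 1) r₂ : Int) := by
            rw [hcvdcons, if_neg (fun h => hx h.1)]
            simp
          rw [ih (l + 1) r₂ _ _ _ (by omega) (by omega) hr₂n hHV2 hcov2 hQshrink]
          rw [hdrop, List.flatMap_cons, hwref]
          simp
    · rw [List.drop_eq_nil_of_le (by simpa [List.length_range] using not_lt.mp hl)]
      simp [acwLoop, hl]

lemma bScan_spec (chain S : List String) (l : Nat) :
    ∀ (fuel k : Nat), l ≤ k → k ≤ chain.length → chain.length - k ≤ fuel →
      (∀ j, l ≤ j → j < k → pvCovB chain S l j = false) →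
      ∃ k₂ : Nat, l ≤ k₂ ∧ k₂ ≤ chain.length ∧
        bScan fuel chain (chain.length : Int)
            (S.filter (fun y => !decide (y ∈ pvWin chain l k))) ((k : Int) - 1)
          = (S.filter (fun y => !decide (y ∈ pvWin chain l k₂)), (k₂ : Int) - 1) ∧
        (S.filter (fun y => !decide (y ∈ pvWin chain l k₂)) = [] ∨ k₂ = chain.length) ∧
        (∀ j, l ≤ j → j < k₂ → pvCovB chain S l j = false) := by
  intro fuel
  induction fuel with
  | zero =>
    intro k h1 h2 h3 h4
    exact ⟨k, h1, h2, by simp [bScan], Or.inr (by omega), h4⟩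
  | succ fuel ih =>
    intro k h1 h2 h3 h4
    by_cases hcond : S.filter (fun y => !decide (y ∈ pvWin chain l k)) ≠ [] ∧
        (k : Int) - 1 + 1 < (chain.length : Int)
    · have hklen : k < chain.length := by
        have := hcond.2
        omega
      have hcovk : pvCovB chain S l k = false := by
        obtain ⟨y, hy⟩ := List.exists_mem_of_ne_nil _ hcond.1
        rw [List.mem_filter] at hy
        have hy2 : y ∉ pvWin chain l k := by simpa using hy.2
        rw [← Bool.not_eq_true, pvCovB, List.all_eq_true]
        intro hall
        exact hy2 (by simpa using hall y hy.1)
      have hstep : bScan (fuel + 1) chain (chain.length : Int)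
            (S.filter (fun y => !decide (y ∈ pvWin chain l k))) ((k : Int) - 1)
          = bScan fuel chain (chain.length : Int)
            (S.filter (fun y => !decide (y ∈ pvWin chain l (k + 1)))) (((k : Nat) + 1 : Int) - 1) := by
        conv_lhs => rw [bScan]
        rw [if_pos hcond]
        show bScan fuel chain (chain.length : Int)
            (PySem.Set.discard (S.filter (fun y => !decide (y ∈ pvWin chain l k)))
              ((PySem.List.pyGet? chain ((k : Int) - 1 + 1)).getD "")) ((k : Int) - 1 + 1) = _
        have hidx : (k : Int) - 1 + 1 = ((k : Nat) : Int) := by ring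
        rw [hidx]
        have hget : (PySem.List.pyGet? chain ((k : Nat) : Int)).getD "" = chain.getD k "" := by
          rw [PySem.List.pyGet?_natCast]
          rw [List.getD_eq_getElem?_getD]
        rw [hget]
        have hrem : PySem.Set.discard (S.filter (fun y => !decide (y ∈ pvWin chain l k)))
              (chain.getD k "")
            = S.filter (fun y => !decide (y ∈ pvWin chain l (k + 1))) := by
          show List.filter (fun y => !(y == chain.getD k ""))
              (S.filter (fun y => !decide (y ∈ pvWin chain l k))) = _
          rw [List.filter_filter]
          apply List.filter_congr
          intro y hy
          have hmem : y ∈ pvWin chain l (k + 1) ↔ y ∈ pvWin chain l k ∨ y = chain.getD k "" := by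
            rw [pvWin_snoc chain l k h1 hklen]
            simp [List.mem_append]
          by_cases hc1 : y ∈ pvWin chain l k
          · have h5 : y ∈ pvWin chain l (k + 1) := hmem.mpr (Or.inl hc1)
            simp [hc1, h5]
          · by_cases hc2 : y = chain.getD k ""
            · have h5 : y ∈ pvWin chain l (k + 1) := hmem.mpr (Or.inr hc2)
              simp [hc2]
              show chain.getD k "" ∈ pvWin chain l (k + 1)
              rw [← hc2]
              exact h5
            · have h5 : y ∉ pvWin chain l (k + 1) := fun hcc => (hmem.mp hcc).elim hc1 hc2
              simp [hc1, h5]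
              exact hc2
        rw [hrem]
        congr 1
        ring_nf
      obtain ⟨k₂, hk1, hk2, heq, hdisj, hmin⟩ := ih (k + 1) (by omega) (by omega) (by omega)
        (by
          intro j hj1 hj2
          rcases Nat.lt_or_ge j k with hlt | hge
          · exact h4 j hj1 hlt
          · have : j = k := by omega
            rw [this]
            exact hcovk)
      exact ⟨k₂, hk1, hk2, by rw [hstep]; exact heq, hdisj, hmin⟩
    · refine ⟨k, h1, h2, ?_, ?_, h4⟩
      · conv_lhs => rw [bScan]
        rw [if_neg hcond]
      · rcases not_and_or.mp hcond with h | h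
        · left
          exact not_not.mp h
        · right
          omega

lemma pvFilter_init (chain S : List String) (l : Nat) :
    S = S.filter (fun y => !decide (y ∈ pvWin chain l l)) := by
  rw [pvWin_self]
  simp

lemma alt_eq (chain universe_ : List String) (ml : Int) :
    all_covering_windows_py_alt chain universe_ ml
      = (List.range chain.length).flatMap (pvWRef chain (PySem.Set.ofList universe_) ml) := by
  unfold all_covering_windows_py_alt
  simp only []
  have hbody : ∀ (res : List (List String)), ∀ l ∈ List.range chain.length,
      (fun (res : List (List String)) (l : Nat) =>
        let t := bScan chain.length chain ((chain.length : Nat) : Int)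
          (PySem.Set.ofList universe_) ((l : Int) - 1)
        if t.1 ≠ [] then res
        else
          (PySem.List.pyRange (max t.2 ((l : Int) + ml - 1)) ((chain.length : Nat) : Int) 1).foldl
            (fun acc rr => acc ++ [PySem.List.slice chain (some (l : Int)) (some (rr + 1))]) res) res l
      = res ++ pvWRef chain (PySem.Set.ofList universe_) ml l := by
    intro res l hl
    have hln : l < chain.length := List.mem_range.mp hl
    obtain ⟨k₂, hk1, hk2, heq, hdisj, hmin⟩ :=
      bScan_spec chain (PySem.Set.ofList universe_) l chain.length l (le_refl l) (by omega)
        (by omega) (by intro j hj1 hj2; omega)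
    have heq' : bScan chain.length chain ((chain.length : Nat) : Int)
          (PySem.Set.ofList universe_) ((l : Int) - 1)
        = ((PySem.Set.ofList universe_).filter (fun y => !decide (y ∈ pvWin chain l k₂)),
            (k₂ : Int) - 1) := by
      conv_lhs => rw [pvFilter_init chain (PySem.Set.ofList universe_) l]
      exact heq
    simp only [heq']
    by_cases hrem : (PySem.Set.ofList universe_).filter
        (fun y => !decide (y ∈ pvWin chain l k₂)) = []
    · have hcov : pvCovB chain (PySem.Set.ofList universe_) l k₂ = true := by
        rw [pvCovB, List.all_eq_true]
        intro y hy
        have := List.filter_eq_nil_iff.mp hrem y hy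
        simpa using this
      have hmc := pvMc_eq_some chain (PySem.Set.ofList universe_) l k₂ hk1 hk2 hcov hmin
      rw [hrem]
      simp only [ne_eq, not_true_eq_false, if_false]
      rw [PySem.List.foldl_append_singleton_eq_map]
      unfold pvWRef
      rw [hmc]
      rfl
    · have hk₂len : k₂ = chain.length := hdisj.resolve_left hrem
      have hmc : pvMc chain (PySem.Set.ofList universe_) l = none := by
        apply pvMc_eq_none
        intro j hj1 hj2
        rcases Nat.lt_or_ge j chain.length with hjlt | hjge
        · exact hmin j hj1 (by omega)
        · have hje : j = k₂ := by omega
          obtain ⟨y, hy⟩ := List.exists_mem_of_ne_nil _ hrem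
          rw [List.mem_filter] at hy
          have hy2 : y ∉ pvWin chain l k₂ := by simpa using hy.2
          rw [hje, ← Bool.not_eq_true, pvCovB, List.all_eq_true]
          intro hall
          exact hy2 (by simpa using hall y hy.1)
      rw [if_pos hrem]
      unfold pvWRef
      rw [hmc]
      simp
  rw [PySem.List.foldl_congr_mem _ _
      (fun res l => res ++ pvWRef chain (PySem.Set.ofList universe_) ml l) []
      (fun acc x hx => hbody acc x hx)]
  rw [PySem.List.foldl_append_eq_flatMap]
  simp

lemma acwLoop_nil (chain : List String) (ml : Int) :
    ∀ (fuel l : Nat) (res : List (List String)), chain.length - l ≤ fuel →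
      acwLoop fuel chain [] 0 ml chain.length l 0 PySem.Dict.empty 0 res
        = res ++ ((List.range chain.length).drop l).flatMap (fun i => pvWinsFrom chain ml i (-1)) := by
  intro fuel
  induction fuel with
  | zero =>
    intro l res h
    rw [List.drop_eq_nil_of_le (by simp [List.length_range]; omega)]
    simp [acwLoop]
  | succ fuel ih =>
    intro l res h
    by_cases hl : l < chain.length
    · have hwhile : acwWhile chain.length chain [] 0 chain.length 0 PySem.Dict.empty 0
          = (0, PySem.Dict.empty, 0) := by
        cases hfe : chain.length with
        | zero => omega
        | succ m =>
          rw [acwWhile]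
          rw [if_neg (by simp)]
      conv_lhs => rw [acwLoop]
      rw [if_pos hl, hwhile]
      simp only []
      rw [if_neg List.not_mem_nil]
      rw [if_pos trivial]
      have hmr : ((0 : Nat) : Int) - 1 = (-1 : Int) := by norm_num
      rw [hmr]
      rw [pvEmit_eq chain ml l (-1) res]
      rw [ih (l + 1) _ (by omega)]
      rw [pvDrop_range_cons chain.length l hl, List.flatMap_cons]
      simp [List.append_assoc]
    · rw [List.drop_eq_nil_of_le (by simp [List.length_range]; omega)]
      simp [acwLoop, hl]

lemma A_empty (chain : List String) (ml : Int) :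
    all_covering_windows_py chain [] ml
      = (List.range chain.length).flatMap (fun i => pvWinsFrom chain ml i (-1)) := by
  unfold all_covering_windows_py
  simp only []
  have hS : PySem.Set.ofList ([] : List String) = [] := rfl
  rw [hS]
  have := acwLoop_nil chain ml chain.length 0 [] (by omega)
  simpa using this

lemma empty_wins_eq (chain : List String) (ml : Int) (hml : 0 ≤ ml ∨ chain.length ≤ 1) :
    ∀ l ∈ List.range chain.length, pvWinsFrom chain ml l (-1) = pvWRef chain [] ml l := by
  intro l hl
  have hln : l < chain.length := List.mem_range.mp hl
  have hmc : pvMc chain [] l = some l :=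
    pvMc_eq_some chain [] l l (le_refl l) (by omega) (by simp [pvCovB])
      (by intro j h1 h2; omega)
  unfold pvWRef
  rw [hmc]
  unfold pvWinsFrom
  have hmax : max (-1 : Int) ((l : Int) + ml - 1) = max ((l : Int) - 1) ((l : Int) + ml - 1) := by
    rcases hml with h | h
    · rcases eq_or_lt_of_le h with h0 | h1
      · rw [← h0]
        have e1 : (l : Int) + 0 - 1 = (l : Int) - 1 := by ring
        rw [e1, max_eq_right (by omega), max_self]
      · rw [max_eq_right (by omega), max_eq_right (by omega)]
    · have : l = 0 := by omega
      subst this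
      norm_num
  rw [hmax]


lemma pvWinsFrom_length (chain : List String) (ml : Int) (l : Nat) (m : Int) :
    (pvWinsFrom chain ml l m).length
      = ((chain.length : Int) - max m ((l : Int) + ml - 1)).toNat := by
  unfold pvWinsFrom
  rw [List.length_map, PySem.List.length_pyRange_one]

lemma pvWRef_nil_eq (chain : List String) (ml : Int) (l : Nat) (hl : l < chain.length) :
    pvWRef chain [] ml l = pvWinsFrom chain ml l ((l : Int) - 1) := by
  have hmc : pvMc chain [] l = some l :=
    pvMc_eq_some chain [] l l (le_refl l) (by omega) (by simp [pvCovB])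
      (by intro j h1 h2; omega)
  unfold pvWRef
  rw [hmc]

-- ===== VERDICT (by name: the statement is the Claim_ definition above) =====
theorem all_covering_windows_py_spec : Claim_unchanged_all_covering_windows_py := by
  intro chain universe_ ml _ hD
  by_cases hU : universe_ = []
  · subst hU
    rw [A_empty, alt_eq]
    have hml : 0 ≤ ml ∨ chain.length ≤ 1 := by
      by_contra hcon
      rw [not_or, not_le, not_le] at hcon
      exact hD ⟨rfl, by omega, by omega⟩
    have hS : PySem.Set.ofList ([] : List String) = [] := rfl
    rw [hS]
    rw [List.flatMap_def, List.flatMap_def]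
    exact congrArg List.flatten (List.map_congr_left (empty_wins_eq chain ml hml))
  · have hne : PySem.Set.ofList universe_ ≠ [] := by
      obtain ⟨u, hu⟩ := List.exists_mem_of_ne_nil universe_ hU
      intro hcon
      have hmem : u ∈ PySem.Set.ofList universe_ := (PySem.Set.mem_ofList _ _).mpr hu
      rw [hcon] at hmem
      simp at hmem
    rw [alt_eq]
    unfold all_covering_windows_py
    simp only []
    rw [acwLoop_spec chain (PySem.Set.ofList universe_) ml hne
        (PySem.Set.nodup_ofList universe_) chain.length 0 0 PySem.Dict.empty 0 []
        (by omega) (le_refl 0) (by omega)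
        (by
          intro x
          rw [PySem.Dict.getD_empty]
          by_cases hx : x ∈ PySem.Set.ofList universe_
          · rw [if_pos hx, pvWin_self]
            simp
          · rw [if_neg hx])
        (by simp [pvCvd, pvWin_self])
        (by intro j h1 h2; omega)]
    simp

theorem all_covering_windows_py_changed : Claim_changed_all_covering_windows_py := by
  unfold Claim_changed_all_covering_windows_py; decide

theorem all_covering_windows_py_tight : Claim_exact_all_covering_windows_py := by
  intro chain universe_ ml _ hD
  obtain ⟨hU, hml, hn⟩ := hD
  subst hU
  rw [A_empty, alt_eq]
  intro heq
  have hS : PySem.Set.ofList ([] : List String) = [] := rfl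
  rw [hS] at heq
  have hlen := congrArg List.length heq
  rw [List.length_flatMap, List.length_flatMap] at hlen
  have hlt : ((List.range chain.length).map (fun l => (pvWRef chain [] ml l).length)).sum
      < ((List.range chain.length).map (fun l => (pvWinsFrom chain ml l (-1)).length)).sum := by
    apply List.sum_lt_sum
    · intro l hl
      have hln := List.mem_range.mp hl
      rw [pvWRef_nil_eq chain ml l hln, pvWinsFrom_length, pvWinsFrom_length]
      apply Int.toNat_le_toNat
      have h1 : max (-1 : Int) ((l : Int) + ml - 1) ≤ max ((l : Int) - 1) ((l : Int) + ml - 1) :=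
        max_le_max (by omega) (le_refl _)
      omega
    · refine ⟨1, List.mem_range.mpr (by omega), ?_⟩
      rw [pvWRef_nil_eq chain ml 1 (by omega), pvWinsFrom_length, pvWinsFrom_length]
      have c1 : (((1 : Nat) : Int)) = 1 := by norm_num
      rw [c1, max_eq_left (by omega), max_eq_left (by omega)]
      omega
  omega
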